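-- pv_equiv track=rewrite | github.com/BinaryIgor/personal-website | scripts/igroz_cli.py | all_in_quotes
-- ===== SOURCE A (Python) =====
-- def all_in_quotes(string):
--     quotes_chars = ['"', "'", "`"]
--     in_quotes = []
--     collecting = False
--     chars = []
--
--     for c in string:
--         if c in quotes_chars:
--             collecting = not collecting
--
--             if not collecting:
--                 in_quotes.append("".join(chars))
--                 chars = []
--         elif collecting:
--             chars.append(c)
--
--     return in_quotes
-- ===== SOURCE B (Python) =====
-- def all_in_quotes(string):
--     qs = [i for i, c in enumerate(string) if c in '"\'`']
--     return [string[qs[2 * k] + 1: qs[2 * k + 1]] for k in range(len(qs) // 2)]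
-- ===== Notes on version B (the rewrite author's own statement) =====
-- stated objective: alternative
-- what changed: Replaces the toggle-flag character accumulator scan with a two-phase approach: collect the indices of all quote characters, then slice the string between each consecutive index pair (unpaired trailing quote simply has no partner).
import Mathlib
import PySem

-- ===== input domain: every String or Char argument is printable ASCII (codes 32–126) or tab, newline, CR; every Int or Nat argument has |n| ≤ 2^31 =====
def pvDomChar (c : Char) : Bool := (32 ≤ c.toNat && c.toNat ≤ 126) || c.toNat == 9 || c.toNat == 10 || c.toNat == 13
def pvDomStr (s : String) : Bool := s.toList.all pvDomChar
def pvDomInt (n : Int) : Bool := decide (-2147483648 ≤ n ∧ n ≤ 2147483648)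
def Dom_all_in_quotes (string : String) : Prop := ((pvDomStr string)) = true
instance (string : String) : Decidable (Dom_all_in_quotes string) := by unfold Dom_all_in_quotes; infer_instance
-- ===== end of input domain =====

-- B replaces A's toggle-flag scan with collecting the quote positions and slicing between
-- consecutive position pairs (objective: alternative algorithm, same cost).

-- ===== PORT A =====
-- one loop iteration of A: state = (in_quotes, collecting, chars)
def aqStep (st : List String × Bool × List Char) (c : Char) : List String × Bool × List Char :=
  if ['"', '\'', '`'].contains c then
    if st.2.1 then (st.1 ++ [String.ofList st.2.2], false, ([] : List Char))
    else (st.1, true, st.2.2)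
  else if st.2.1 then (st.1, st.2.1, st.2.2 ++ [c])
  else st

def all_in_quotes (string : String) : List String :=
  (string.toList.foldl aqStep (([] : List String), false, ([] : List Char))).1

-- ===== PORT B =====
def all_in_quotes_alt (string : String) : List String :=
  let qs : List Int := ((PySem.List.enumerate string.toList 0).filter
      (fun p => ['"', '\'', '`'].contains p.2)).map (·.1)
  (PySem.List.pyRange 0 (PySem.Int.floordiv (qs.length : Int) 2) 1).map (fun k =>
    String.ofList (PySem.List.slice string.toList
      (some (PySem.List.pyGetD qs (2 * k) 0 + 1))
      (some (PySem.List.pyGetD qs (2 * k + 1) 0))))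

-- ===== PRECONDITION & SPEC =====
def Spec_all_in_quotes (string : String) (out : List String) : Prop := out = all_in_quotes_alt string
instance (string : String) (out : List String) : Decidable (Spec_all_in_quotes string out) := by unfold Spec_all_in_quotes; infer_instance

-- ===== CLAIM (what is proved, stated in full; the proofs are below) =====
def Claim_equal_all_in_quotes : Prop := ∀ (string : String), Dom_all_in_quotes string → Spec_all_in_quotes string (all_in_quotes string)

-- ===== LEMMAS AND PROOFS =====

def isQ (c : Char) : Bool := ['"', '\'', '`'].contains c

-- head segment (before the first quote) and remaining segments (after each quote)
def segsHT : List Char → List Char × List (List Char)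
  | [] => ([], [])
  | c :: cs =>
    let p := segsHT cs
    if isQ c then ([], p.1 :: p.2) else (c :: p.1, p.2)

def pairsFst : List (List Char) → List (List Char)
  | a :: _ :: t => a :: pairsFst t
  | _ => []

def specN (cs : List Char) : List String := (pairsFst (segsHT cs).2).map String.ofList

def specC (chs : List Char) (cs : List Char) : List String :=
  match (segsHT cs).2 with
  | [] => []
  | _ :: t' => String.ofList (chs ++ (segsHT cs).1) :: (pairsFst t').map String.ofList

-- quote positions
def qsN : List Char → List Nat
  | [] => []
  | c :: cs => if isQ c then 0 :: (qsN cs).map (· + 1) else (qsN cs).map (· + 1)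

def pairSlicesN (s : List Char) : List Nat → List String
  | p :: r :: t => String.ofList ((s.drop (p + 1)).take (r - (p + 1))) :: pairSlicesN s t
  | _ => []

-- ---- A side ----

theorem aFold (cs : List Char) :
    (∀ acc, (cs.foldl aqStep (acc, false, ([] : List Char))).1 = acc ++ specN cs) ∧
    (∀ acc chs, (cs.foldl aqStep (acc, true, chs)).1 = acc ++ specC chs cs) := by
  induction cs with
  | nil =>
    constructor
    · intro acc; simp [specN, segsHT, pairsFst]
    · intro acc chs; simp [specC, segsHT]
  | cons c cs ih =>
    obtain ⟨ihN, ihC⟩ := ih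
    constructor
    · intro acc
      by_cases hq : isQ c
      · have : aqStep (acc, false, ([] : List Char)) c = (acc, true, ([] : List Char)) := by
          simp only [isQ] at hq; simp only [aqStep]; rw [hq]; simp
        rw [List.foldl_cons, this, ihC]
        simp only [specN, specC, segsHT, hq, if_pos]
        cases h2 : (segsHT cs).2 with
        | nil => simp [pairsFst]
        | cons x t' => simp [pairsFst]
      · have hq' : (['"', '\'', '`'].contains c) = false := by
          simp only [isQ] at hq; simpa using hq
        have : aqStep (acc, false, ([] : List Char)) c = (acc, false, ([] : List Char)) := by
          simp only [aqStep]; rw [hq']; simp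
        rw [List.foldl_cons, this, ihN]
        simp [specN, segsHT, hq]
    · intro acc chs
      by_cases hq : isQ c
      · have : aqStep (acc, true, chs) c = (acc ++ [String.ofList chs], false, ([] : List Char)) := by
          simp only [isQ] at hq; simp only [aqStep]; rw [hq]; simp
        rw [List.foldl_cons, this, ihN]
        simp only [specC, specN, segsHT, hq, if_pos]
        simp
      · have hq' : (['"', '\'', '`'].contains c) = false := by
          simp only [isQ] at hq; simpa using hq
        have : aqStep (acc, true, chs) c = (acc, true, chs ++ [c]) := by
          simp only [aqStep]; rw [hq']; simp
        rw [List.foldl_cons, this, ihC]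
        simp only [specC, segsHT, hq, if_neg, Bool.false_eq_true, not_false_iff]
        cases h2 : (segsHT cs).2 with
        | nil => simp
        | cons x t' => simp

theorem a_eq_specN (s : String) : all_in_quotes s = specN s.toList := by
  have h := (aFold s.toList).1 []
  simpa [all_in_quotes] using h

-- ---- B side ----

theorem qs_eq (cs : List Char) : ∀ (k : Int),
    ((PySem.List.enumerate cs k).filter (fun p => isQ p.2)).map (·.1)
      = (qsN cs).map (fun (n : Nat) => (n : Int) + k) := by
  induction cs with
  | nil => intro k; simp [PySem.List.enumerate, qsN]
  | cons c cs ih =>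
    intro k
    by_cases hq : isQ c
    · simp only [PySem.List.enumerate, qsN, hq, if_pos, List.filter_cons, List.map_cons,
        List.map_map]
      rw [ih (k + 1)]
      simp only [Nat.cast_zero, zero_add]
      congr 1
      apply List.map_congr_left
      intro n _
      simp only [Function.comp]
      push_cast
      ring
    · have hq' : isQ c = false := by simpa using hq
      simp only [PySem.List.enumerate, qsN, hq', List.filter_cons,
        Bool.false_eq_true, if_false, List.map_map]
      rw [ih (k + 1)]
      apply List.map_congr_left
      intro n _
      simp only [Function.comp]
      push_cast
      ring

theorem shift1 (c : Char) (s : List Char) : ∀ (l : List Nat),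
    pairSlicesN (c :: s) (l.map (· + 1)) = pairSlicesN s l
  | [] => rfl
  | [p] => rfl
  | p :: r :: t => by
    simp only [List.map_cons, pairSlicesN, shift1 c s t]
    have h1 : p + 1 + 1 = (p + 1) + 1 := rfl
    have h2 : r + 1 - (p + 1 + 1) = r - (p + 1) := by omega
    simp [h2, List.drop_succ_cons]

theorem beta (s : List Char) : ∀ (l : List Nat),
    (List.range (l.length / 2)).map (fun j =>
      String.ofList ((s.drop (l.getD (2 * j) 0 + 1)).take (l.getD (2 * j + 1) 0 - (l.getD (2 * j) 0 + 1))))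
      = pairSlicesN s l
  | [] => rfl
  | [p] => by simp [pairSlicesN]
  | p :: r :: t => by
    have hlen : (p :: r :: t).length / 2 = t.length / 2 + 1 := by simp; omega
    rw [hlen, List.range_succ_eq_map, List.map_cons, List.map_map]
    have htail : List.map ((fun j => String.ofList
        ((s.drop ((p :: r :: t).getD (2 * j) 0 + 1)).take
          ((p :: r :: t).getD (2 * j + 1) 0 - ((p :: r :: t).getD (2 * j) 0 + 1)))) ∘ Nat.succ)
        (List.range (t.length / 2))
        = List.map (fun j => String.ofList
        ((s.drop (t.getD (2 * j) 0 + 1)).take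
          (t.getD (2 * j + 1) 0 - (t.getD (2 * j) 0 + 1)))) (List.range (t.length / 2)) := by
      apply List.map_congr_left
      intro j _
      have e1 : 2 * Nat.succ j = (2 * j) + 2 := by omega
      have e2 : 2 * Nat.succ j + 1 = (2 * j + 1) + 2 := by omega
      simp only [Function.comp, e1, List.getD_cons_succ]
    rw [htail, beta s t]
    simp [pairSlicesN]

theorem main (cs : List Char) :
    (pairSlicesN cs (qsN cs) = specN cs) ∧
    (qsN cs = [] ↔ (segsHT cs).2 = []) ∧
    (∀ r t0, qsN cs = r :: t0 → (segsHT cs).2 ≠ [] ∧ cs.take r = (segsHT cs).1 ∧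
      pairSlicesN cs t0 = (pairsFst (segsHT cs).2.tail).map String.ofList) := by
  induction cs with
  | nil =>
    refine ⟨by simp [qsN, segsHT, specN, pairsFst, pairSlicesN], by simp [qsN, segsHT], ?_⟩
    intro r t0 h
    simp [qsN] at h
  | cons c cs ih =>
    obtain ⟨ihN, ihE, ihC⟩ := ih
    by_cases hq : isQ c
    · have hqs : qsN (c :: cs) = 0 :: (qsN cs).map (· + 1) := by simp [qsN, hq]
      have hseg : segsHT (c :: cs) = ([], (segsHT cs).1 :: (segsHT cs).2) := by
        simp [segsHT, hq]
      refine ⟨?_, ?_, ?_⟩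
      · simp only [specN]
        rw [hqs, hseg]
        cases hq0 : qsN cs with
        | nil =>
          have ht : (segsHT cs).2 = [] := ihE.mp hq0
          simp [pairSlicesN, ht, pairsFst]
        | cons r t0 =>
          obtain ⟨h1, h2, h3⟩ := ihC r t0 hq0
          cases ht : (segsHT cs).2 with
          | nil => exact absurd ht h1
          | cons x t2 =>
            simp only [List.map_cons, pairSlicesN, pairsFst]
            rw [shift1]
            rw [ht] at h3
            simp only [List.tail_cons] at h3
            have e : r + 1 - (0 + 1) = r := by omega
            simp [e, h2, h3]
      · rw [hqs, hseg]; simp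
      · intro r t0 h
        rw [hqs] at h
        injection h with h1 h2
        subst h1; subst h2
        rw [hseg]
        refine ⟨by simp, by simp, ?_⟩
        simp only [List.tail_cons]
        rw [shift1, ihN]
        rfl
    · have hq' : isQ c = false := by simpa using hq
      have hqs : qsN (c :: cs) = (qsN cs).map (· + 1) := by simp [qsN, hq']
      have hseg : segsHT (c :: cs) = (c :: (segsHT cs).1, (segsHT cs).2) := by
        simp [segsHT, hq']
      refine ⟨?_, ?_, ?_⟩
      · rw [hqs, shift1, ihN]
        simp [specN, hseg]
      · rw [hqs, hseg]
        simpa using ihE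
      · intro r t0 h
        rw [hqs] at h
        cases hq0 : qsN cs with
        | nil => rw [hq0] at h; simp at h
        | cons r' t0' =>
          rw [hq0] at h
          simp only [List.map_cons] at h
          injection h with h1 h2
          obtain ⟨g1, g2, g3⟩ := ihC r' t0' hq0
          rw [hseg]
          refine ⟨g1, ?_, ?_⟩
          · simp only [← h1, List.take_succ_cons, g2]
          · rw [← h2, shift1, g3]

theorem getD_map_cast (l : List Nat) (n : Nat) :
    (l.map (Nat.cast : Nat → Int)).getD n 0 = ((l.getD n 0 : Nat) : Int) := by
  simp only [List.getD, List.getElem?_map]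
  cases l[n]? <;> simp

theorem fd2 (n : Nat) : PySem.Int.floordiv (n : Int) 2 = ((n / 2 : Nat) : Int) := by
  show ((n : Int).fdiv 2) = _
  rw [show ((2 : Int)) = ((2 : Nat) : Int) from rfl, ← Int.ofNat_fdiv]

theorem b_eq_specN (s : String) : all_in_quotes_alt s = specN s.toList := by
  rw [← (main s.toList).1]
  unfold all_in_quotes_alt
  have hqs : ((PySem.List.enumerate s.toList 0).filter
      (fun p => ['"', '\'', '`'].contains p.2)).map (·.1)
      = (qsN s.toList).map (Nat.cast : Nat → Int) := by
    have := qs_eq s.toList 0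
    simp only [isQ] at this
    simpa using this
  rw [hqs]
  rw [← beta s.toList (qsN s.toList)]
  simp only [List.length_map, fd2]
  rw [PySem.List.pyRange_one, List.map_map]
  apply List.map_congr_left
  intro j hj
  simp only [Function.comp]
  have e1 : (0 : Int) + (j : Int) = ((j : Nat) : Int) := by ring
  have e2 : (2 : Int) * ((j : Nat) : Int) = ((2 * j : Nat) : Int) := by push_cast; ring
  have e3 : (2 : Int) * ((j : Nat) : Int) + 1 = ((2 * j + 1 : Nat) : Int) := by push_cast; ring
  rw [e1, e3, e2, PySem.List.pyGetD_natCast, PySem.List.pyGetD_natCast,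
    getD_map_cast, getD_map_cast]
  have e4 : (((qsN s.toList).getD (2 * j) 0 : Nat) : Int) + 1
      = (((qsN s.toList).getD (2 * j) 0 + 1 : Nat) : Int) := by push_cast; ring
  rw [e4, PySem.List.slice_natCast]

-- ===== VERDICT (by name: the statement is the Claim_ definition above) =====
theorem all_in_quotes_spec : Claim_equal_all_in_quotes := by
  intro s _
  unfold Spec_all_in_quotes
  rw [a_eq_specN, b_eq_specN]
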